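-- pv_equiv track=rewrite | github.com/ieeta-pt/Multi-Head-CRF | evaluation/load_datasets.py | valid_code
-- ===== SOURCE A (Python) =====
-- def contains_only_digits(s):
--     assert isinstance(s, str)
--     for c in s:
--         if c not in '0123456789':
--             return False
--     return True
--
-- def valid_code(code):
--     assert isinstance(code, str)
--     #
--     if '+' in code:
--         codes = code.split('+')
--     else:
--         codes = [code]
--     #
--     for code in codes:
--         if code == 'NO_CODE':
--             continue
--         if not contains_only_digits(code):
--             return False
--     #
--     return True
-- ===== SOURCE B (Python) =====
-- def valid_code(code):
--     assert isinstance(code, str)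
--     i, n = 0, len(code)
--     while True:
--         if code.startswith('NO_CODE', i) and (i + 7 == n or (i + 7 < n and code[i + 7] == '+')):
--             i += 7
--         else:
--             while i < n and code[i] in '0123456789':
--                 i += 1
--         if i == n:
--             return True
--         if code[i] != '+':
--             return False
--         i += 1
-- ===== Notes on version B (the rewrite author's own statement) =====
-- stated objective: alternative
-- what changed: A splits the string at the plus separators into a list of segment strings and then loops over that list; B never materialises the segment list and validates in a single left-to-right scan of the characters (a NO_CODE prefix test at each segment start, otherwise a digit run up to the next separator).
import Mathlib
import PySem

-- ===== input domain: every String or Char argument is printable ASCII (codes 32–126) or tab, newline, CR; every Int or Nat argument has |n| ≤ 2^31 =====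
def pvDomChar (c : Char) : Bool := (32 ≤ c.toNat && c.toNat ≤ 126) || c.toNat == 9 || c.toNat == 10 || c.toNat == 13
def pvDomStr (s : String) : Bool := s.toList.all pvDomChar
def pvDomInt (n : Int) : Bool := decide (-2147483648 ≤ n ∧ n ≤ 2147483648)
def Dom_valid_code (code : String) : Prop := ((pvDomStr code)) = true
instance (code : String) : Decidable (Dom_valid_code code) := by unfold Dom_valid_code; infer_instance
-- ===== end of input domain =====

-- B replaces A's split-then-per-segment-loop with a single left-to-right scan of the
-- string (no intermediate list of segments); objective: alternative (same cost, different algorithm).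

-- ===== PORT A =====
-- for c in s: if c not in '0123456789': return False / return True
def contains_only_digits_go (cs : List Char) : Bool :=
  match cs with
  | [] => true
  | c :: rest =>
    if PySem.Chars.isIn [c] "0123456789".toList = false then false
    else contains_only_digits_go rest

def contains_only_digits (s : String) : Bool := contains_only_digits_go s.toList

-- for code in codes: if code == 'NO_CODE': continue; if not contains_only_digits(code): return False / return True
def valid_code_loop (codes : List String) : Bool :=
  match codes with
  | [] => true
  | c :: rest =>
    if c = "NO_CODE" then valid_code_loop rest
    else if contains_only_digits c = false then false
    else valid_code_loop rest

def valid_code (code : String) : Bool :=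
  let codes :=
    if PySem.Str.isIn "+" code then (PySem.Str.split? code "+").getD [code]  -- sep ≠ "", so split? is some
    else [code]
  valid_code_loop codes

-- ===== PORT B =====
-- Source B's scan, one position at a time over the remaining characters:
-- vv_go = loop head at a segment start (the startswith('NO_CODE', i) test plus the
-- following end-or-'+' test, consuming 7 chars on success);
-- vv_seg = the inner digit-consuming while-loop merged with the common tail
-- (i == n → True; code[i] != '+' → False; else consume '+' and continue).
mutual
def vv_seg (cs : List Char) : Bool :=
  match cs with
  | [] => true
  | c :: rest =>
    if PySem.Chars.isIn [c] "0123456789".toList then vv_seg rest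
    else if c = '+' then vv_go rest
    else false
termination_by 2 * cs.length
decreasing_by all_goals (simp; try omega)

def vv_go (cs : List Char) : Bool :=
  match cs with
  | 'N'::'O'::'_'::'C'::'O'::'D'::'E'::[] => true
  | 'N'::'O'::'_'::'C'::'O'::'D'::'E'::'+'::rest => vv_go rest
  | cs => vv_seg cs
termination_by 2 * cs.length + 1
decreasing_by all_goals (simp; try omega)
end

def valid_code_alt (code : String) : Bool := vv_go code.toList

-- ===== PRECONDITION & SPEC =====
def Spec_valid_code (code : String) (out : Bool) : Prop := out = valid_code_alt code
instance (code : String) (out : Bool) : Decidable (Spec_valid_code code out) := by unfold Spec_valid_code; infer_instance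

-- ===== CLAIM (what is proved, stated in full; the proofs are below) =====
def Claim_equal_valid_code : Prop := ∀ (code : String), Dom_valid_code code → Spec_valid_code code (valid_code code)

-- ===== LEMMAS AND PROOFS =====

-- proof-side model: split a char list on '+'
def splitP (cs : List Char) : List (List Char) :=
  match cs with
  | [] => [[]]
  | c :: rest =>
    if c = '+' then [] :: splitP rest
    else
      match splitP rest with
      | [] => [[c]]
      | h :: t => (c :: h) :: t

-- A's loop at the char-list level
def vloopC (ls : List (List Char)) : Bool :=
  match ls with
  | [] => true
  | h :: t =>
    if h = "NO_CODE".toList then vloopC t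
    else if contains_only_digits_go h = false then false
    else vloopC t

def consCat (p : List Char) (ls : List (List Char)) : List (List Char) :=
  match ls with
  | [] => [p]
  | h :: t => (p ++ h) :: t

theorem splitP_ne_nil (cs : List Char) : splitP cs ≠ [] := by
  match cs with
  | [] => simp [splitP]
  | c :: rest =>
    simp only [splitP]
    split <;> simp
    split <;> simp

theorem splitOn_go_eq (fuel : Nat) : ∀ (l cur : List Char) (acc : List (List Char)),
    l.length ≤ fuel →
    PySem.Chars.splitOn.go ['+'] fuel l cur acc = acc.reverse ++ consCat cur.reverse (splitP l) := by
  induction fuel with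
  | zero =>
    intro l cur acc h
    have : l = [] := by cases l <;> simp_all
    subst this
    rw [PySem.Chars.splitOn.go.eq_def]
    simp [consCat, splitP]
  | succ f ih =>
    intro l cur acc h
    match l with
    | [] =>
      rw [PySem.Chars.splitOn.go.eq_def]
      simp [consCat, splitP]
    | c :: rest =>
      have hlen : rest.length ≤ f := by simpa using h
      obtain ⟨h', t', hsp⟩ : ∃ h' t', splitP rest = h' :: t' := by
        cases hx : splitP rest with
        | nil => exact absurd hx (splitP_ne_nil rest)
        | cons a b => exact ⟨a, b, rfl⟩
      have hstep : PySem.Chars.splitOn.go ['+'] (f+1) (c :: rest) cur acc =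
          (if ['+'].isPrefixOf (c :: rest) then
            PySem.Chars.splitOn.go ['+'] f (List.drop 1 (c :: rest)) [] (cur.reverse :: acc)
          else PySem.Chars.splitOn.go ['+'] f rest (c :: cur) acc) := by
        rw [PySem.Chars.splitOn.go.eq_def]; rfl
      rw [hstep]
      by_cases hc : c = '+'
      · subst hc
        rw [if_pos (by simp)]
        simp only [List.drop_succ_cons, List.drop_zero]
        rw [ih _ _ _ hlen]
        rw [show splitP ('+' :: rest) = [] :: splitP rest from by simp [splitP]]
        rw [hsp]
        simp only [consCat, List.reverse_nil, List.nil_append, List.reverse_cons,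
          List.append_assoc, List.append_nil, List.singleton_append]
      · rw [if_neg (by simp; exact fun h => hc h.symm)]
        rw [ih _ _ _ hlen]
        rw [show splitP (c :: rest) = (c :: h') :: t' from by simp [splitP, hc, hsp]]
        rw [hsp]
        simp only [consCat, List.reverse_cons, List.append_assoc, List.singleton_append]

theorem splitOn_eq (cs : List Char) : PySem.Chars.splitOn cs ['+'] = splitP cs := by
  unfold PySem.Chars.splitOn
  rw [splitOn_go_eq (cs.length + 1) cs [] [] (by omega)]
  have hne := splitP_ne_nil cs
  cases hsp : splitP cs with
  | nil => exact absurd hsp hne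
  | cons h t => simp [consCat]

theorem singleton_infix_iff (a : Char) (l : List Char) : [a] <:+: l ↔ a ∈ l := by
  constructor
  · rintro ⟨s, t, rfl⟩; simp
  · intro hm
    obtain ⟨s, t, rfl⟩ := List.append_of_mem hm
    exact ⟨s, t, by simp⟩

theorem splitP_no_plus (cs : List Char) (h : '+' ∉ cs) : splitP cs = [cs] := by
  induction cs with
  | nil => simp [splitP]
  | cons c rest ih =>
    simp only [List.mem_cons, not_or] at h
    simp only [splitP]
    rw [if_neg (Ne.symm h.1), ih h.2]

theorem splitP_seg (seg rest : List Char) (h : '+' ∉ seg) :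
    splitP (seg ++ '+' :: rest) = seg :: splitP rest := by
  induction seg with
  | nil => simp [splitP]
  | cons c s ih =>
    simp only [List.mem_cons, not_or] at h
    simp only [List.cons_append, splitP]
    rw [if_neg (Ne.symm h.1), ih h.2]

-- A's result in terms of splitP
theorem valid_code_eq (code : String) :
    valid_code code = vloopC (splitP code.toList) := by
  have hloop : ∀ ls : List (List Char), valid_code_loop (ls.map String.ofList) = vloopC ls := by
    intro ls
    induction ls with
    | nil => simp [valid_code_loop, vloopC]
    | cons h t ih =>
      simp only [List.map_cons, valid_code_loop, vloopC, contains_only_digits,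
        String.toList_ofList]
      have : (String.ofList h = "NO_CODE") ↔ (h = "NO_CODE".toList) := by
        constructor
        · intro he
          have := congrArg String.toList he
          simpa using this
        · intro he
          subst he
          apply String.toList_injective
          simp
      rw [ih]
      split_ifs with h1 h2 h3 h4 h5 <;> simp_all
  unfold valid_code
  by_cases hin : PySem.Str.isIn "+" code = true
  · simp only [hin, if_pos]
    have hs : PySem.Str.split? code "+" =
        some ((PySem.Chars.splitOn code.toList ['+']).map String.ofList) := by
      unfold PySem.Str.split? PySem.Chars.split?
      simp
    rw [hs]
    simp only [Option.getD_some, splitOn_eq]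
    exact hloop _
  · simp only [hin, Bool.false_eq_true, ite_false]
    have hnp : '+' ∉ code.toList := by
      intro hm
      apply hin
      rw [PySem.Str.isIn]
      rw [PySem.Chars.isIn_iff_infix]
      exact (singleton_infix_iff _ _).mpr hm
    rw [splitP_no_plus _ hnp]
    have hofl : String.ofList code.toList = code := by
      apply String.toList_injective
      simp
    have := hloop [code.toList]
    simp only [List.map_cons, List.map_nil] at this
    rw [hofl] at this
    exact this

theorem splitP_spec : ∀ (cs h t : _), splitP cs = h :: t →
    '+' ∉ h ∧ (cs = h ∨ ∃ r, cs = h ++ '+' :: r) := by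
  intro cs
  induction cs with
  | nil =>
    intro h t he
    simp only [splitP, List.cons.injEq] at he
    exact ⟨by simp [← he.1], Or.inl (by simp [← he.1])⟩
  | cons c rest ih =>
    intro h t he
    simp only [splitP] at he
    by_cases hc : c = '+'
    · subst hc
      rw [if_pos rfl] at he
      obtain ⟨rfl, rfl⟩ := List.cons.injEq .. |>.mp he
      exact ⟨by simp, Or.inr ⟨rest, rfl⟩⟩
    · rw [if_neg hc] at he
      cases hsp : splitP rest with
      | nil => exact absurd hsp (splitP_ne_nil rest)
      | cons h'' t'' =>
        rw [hsp] at he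
        obtain ⟨rfl, rfl⟩ := List.cons.injEq .. |>.mp he
        obtain ⟨hnp, hdisj⟩ := ih h'' t'' hsp
        refine ⟨by simp [hnp]; exact fun e => hc e.symm, ?_⟩
        rcases hdisj with rfl | ⟨r, rfl⟩
        · exact Or.inl rfl
        · exact Or.inr ⟨r, rfl⟩

-- B's scan in terms of splitP: the joint invariant for the mutual pair
theorem vv_main : ∀ (n : Nat) (cs : List Char), cs.length ≤ n →
    (vv_seg cs = (match splitP cs with
      | [] => true
      | h :: t => contains_only_digits_go h && vloopC t)) ∧
    vv_go cs = vloopC (splitP cs) := by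
  intro n
  induction n with
  | zero =>
    intro cs h
    have hnil : cs = [] := by cases cs <;> simp_all
    subst hnil
    refine ⟨by simp [vv_seg, splitP, contains_only_digits_go, vloopC], ?_⟩
    rw [show vv_go [] = vv_seg [] from by simp [vv_go]]
    simp [vv_seg, splitP, vloopC, contains_only_digits_go]
  | succ n ih =>
    intro cs hlen
    have hseg : vv_seg cs = (match splitP cs with
        | [] => true
        | h :: t => contains_only_digits_go h && vloopC t) := by
      match cs with
      | [] => simp [vv_seg, splitP, contains_only_digits_go, vloopC]
      | c :: rest =>
        have hr : rest.length ≤ n := by simpa using hlen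
        obtain ⟨h', t', hsp⟩ : ∃ h' t', splitP rest = h' :: t' := by
          cases hx : splitP rest with
          | nil => exact absurd hx (splitP_ne_nil rest)
          | cons a b => exact ⟨a, b, rfl⟩
        rw [vv_seg.eq_def]
        by_cases hd : PySem.Chars.isIn [c] "0123456789".toList = true
        · simp only [hd, if_pos]
          rw [(ih rest hr).1, hsp]
          have hcne : c ≠ '+' := by
            intro e
            subst e
            exact absurd hd (by decide)
          rw [show splitP (c :: rest) = (c :: h') :: t' from by simp [splitP, hcne, hsp]]
          show (contains_only_digits_go h' && vloopC t') =
            (contains_only_digits_go (c :: h') && vloopC t')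
          have hd' : PySem.Chars.isIn [c] ['0','1','2','3','4','5','6','7','8','9'] = true := hd
          rw [show contains_only_digits_go (c :: h') = contains_only_digits_go h' from by
            simp [contains_only_digits_go, hd']]
        · by_cases hp : c = '+'
          · subst hp
            simp only [hd, Bool.false_eq_true, if_false]
            rw [(ih rest hr).2]
            rw [show splitP ('+' :: rest) = [] :: splitP rest from by simp [splitP]]
            rw [hsp]
            simp [contains_only_digits_go]
          · simp only [hd, Bool.false_eq_true, if_false, hp]
            rw [show splitP (c :: rest) = (c :: h') :: t' from by simp [splitP, hp, hsp]]
            have hfalse : PySem.Chars.isIn [c] "0123456789".toList = false := by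
              cases hx : PySem.Chars.isIn [c] "0123456789".toList
              · rfl
              · exact absurd hx hd
            show (false : Bool) = (contains_only_digits_go (c :: h') && vloopC t')
            have hfalse' : PySem.Chars.isIn [c] ['0','1','2','3','4','5','6','7','8','9'] = false :=
              hfalse
            rw [show contains_only_digits_go (c :: h') = false from by
              simp [contains_only_digits_go, hfalse']]
            simp
    refine ⟨hseg, ?_⟩
    rw [vv_go.eq_def]
    split
    · decide
    · rename_i rest
      have hr : rest.length ≤ n := by
        simp at hlen
        omega
      rw [(ih rest hr).2]
      have hsp8 : splitP ('N'::'O'::'_'::'C'::'O'::'D'::'E'::'+'::rest) =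
          "NO_CODE".toList :: splitP rest :=
        splitP_seg ['N','O','_','C','O','D','E'] rest (by decide)
      rw [hsp8]
      simp [vloopC]
    · rename_i hpat1 hpat2
      rw [hseg]
      obtain ⟨h', t', hsp⟩ : ∃ h' t', splitP cs = h' :: t' := by
        cases hx : splitP cs with
        | nil => exact absurd hx (splitP_ne_nil cs)
        | cons a b => exact ⟨a, b, rfl⟩
      rw [hsp]
      have hne : h' ≠ (['N','O','_','C','O','D','E'] : List Char) := by
        intro e
        subst e
        obtain ⟨-, hdisj⟩ := splitP_spec cs _ _ hsp
        rcases hdisj with rfl | ⟨r, rfl⟩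
        · exact hpat1 rfl
        · exact hpat2 r rfl
      cases hcg : contains_only_digits_go h' <;> simp [vloopC, hne, hcg]

theorem valid_code_alt_eq (code : String) :
    valid_code_alt code = vloopC (splitP code.toList) := by
  unfold valid_code_alt
  exact (vv_main code.toList.length code.toList le_rfl).2

-- ===== VERDICT (by name: the statement is the Claim_ definition above) =====
theorem valid_code_spec : Claim_equal_valid_code := by
  intro code _
  unfold Spec_valid_code
  rw [valid_code_eq, valid_code_alt_eq]
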